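-- pv_equiv track=rewrite | github.com/pypi-data/pypi-mirror-22 | packages/tiros/tiros-1.0.31-py2.py3-none-any.whl/tiros/tiros_viz/snapshot_data.py | mk_instance_sg
-- ===== SOURCE A (Python) =====
-- def mk_instance_sg(sg_enis, instance_enis):
--     eni_sg = dict()
--     for sg, eni in sg_enis.items():
--         for e in eni:
--             try:
--                 e_sg = eni_sg[e] + [sg]
--                 eni_sg.update({e:e_sg})
--             except:
--                 eni_sg.update({e:[sg]})
--     instance_sg = {k:eni_sg.get(v,[]) for k,v in instance_enis.items()}
--     return instance_sg
-- ===== SOURCE B (Python) =====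
-- def mk_instance_sg(sg_enis, instance_enis):
--     # Alternative: no reverse eni->SG index; each instance's SG list is computed
--     # by a direct scan of sg_enis (nested comprehension keeps duplicates/order).
--     return {k: [sg for sg, enis in sg_enis.items() for e in enis if e == v]
--             for k, v in instance_enis.items()}
-- ===== Notes on version B (the rewrite author's own statement) =====
-- stated objective: alternative
-- what changed: Replaces the two-phase build of a reverse eni->SG dictionary plus lookups by a single dict comprehension that computes each instance's SG list with a direct nested scan of sg_enis.
import Mathlib
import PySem

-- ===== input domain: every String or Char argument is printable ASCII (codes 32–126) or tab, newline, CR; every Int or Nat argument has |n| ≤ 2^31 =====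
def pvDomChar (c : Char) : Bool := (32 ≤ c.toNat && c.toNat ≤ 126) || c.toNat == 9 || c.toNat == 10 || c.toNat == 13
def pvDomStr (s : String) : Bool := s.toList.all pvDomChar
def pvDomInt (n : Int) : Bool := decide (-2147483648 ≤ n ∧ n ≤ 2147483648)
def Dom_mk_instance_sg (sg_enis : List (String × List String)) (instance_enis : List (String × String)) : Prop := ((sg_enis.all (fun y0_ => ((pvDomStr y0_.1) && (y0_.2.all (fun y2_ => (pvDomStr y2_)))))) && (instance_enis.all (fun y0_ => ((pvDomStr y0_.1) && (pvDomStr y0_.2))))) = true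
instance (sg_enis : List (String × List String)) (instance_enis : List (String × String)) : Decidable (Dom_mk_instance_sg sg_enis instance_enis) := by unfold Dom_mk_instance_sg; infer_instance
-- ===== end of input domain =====

-- B replaces A's reverse eni->SG index by a direct nested scan of sg_enis per instance (alternative decomposition, same results).

-- ===== PORT A =====
def mk_instance_sg (sg_enis : List (String × List String)) (instance_enis : List (String × String)) : List (String × List String) :=
  -- eni_sg = dict(); for sg, eni in sg_enis.items(): for e in eni: eni_sg[e] = eni_sg.get(e, []) + [sg]
  let eni_sg : PySem.Dict String (List String) :=
    sg_enis.foldl (fun d p => p.2.foldl (fun d e => d.modify e [] (· ++ [p.1])) d) PySem.Dict.empty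
  -- instance_sg = {k: eni_sg.get(v, []) for k, v in instance_enis.items()}
  (instance_enis.foldl (fun d kv => d.insert kv.1 (eni_sg.getD kv.2 [])) PySem.Dict.empty).items

-- ===== PORT B =====
def mk_instance_sg_alt (sg_enis : List (String × List String)) (instance_enis : List (String × String)) : List (String × List String) :=
  -- {k: [sg for sg, enis in sg_enis for e in enis if e == v] for k, v in instance_enis}
  instance_enis.map (fun kv =>
    (kv.1, sg_enis.flatMap (fun p => (p.2.filter (fun e => e == kv.2)).map (fun _ => p.1))))

-- ===== PRECONDITION & SPEC =====
-- Pre_ excludes association lists with duplicate keys: they do not represent any Python dict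
-- (a Python dict silently collapses duplicates), so the ports' iteration over duplicates is meaningless.
def Pre_mk_instance_sg (sg_enis : List (String × List String)) (instance_enis : List (String × String)) : Prop :=
  (sg_enis.map Prod.fst).Nodup ∧ (instance_enis.map Prod.fst).Nodup
instance (sg_enis : List (String × List String)) (instance_enis : List (String × String)) : Decidable (Pre_mk_instance_sg sg_enis instance_enis) := by unfold Pre_mk_instance_sg; infer_instance

def pvWitness_mk_instance_sg : (List (String × List String)) × (List (String × String)) :=
  ([("sg1", ["e1", "e2"]), ("sg2", ["e2"])], [("i1", "e2"), ("i2", "e3")])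

def Spec_mk_instance_sg (sg_enis : List (String × List String)) (instance_enis : List (String × String)) (out : List (String × List String)) : Prop := out = mk_instance_sg_alt sg_enis instance_enis
instance (sg_enis : List (String × List String)) (instance_enis : List (String × String)) (out : List (String × List String)) : Decidable (Spec_mk_instance_sg sg_enis instance_enis out) := by unfold Spec_mk_instance_sg; infer_instance

-- ===== CLAIM (what is proved, stated in full; the proofs are below) =====
def Claim_equal_mk_instance_sg : Prop := ∀ (sg_enis : List (String × List String)) (instance_enis : List (String × String)), Dom_mk_instance_sg sg_enis instance_enis → Pre_mk_instance_sg sg_enis instance_enis → Spec_mk_instance_sg sg_enis instance_enis (mk_instance_sg sg_enis instance_enis)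

-- ===== LEMMAS AND PROOFS =====

-- One SG's inner loop appends (number of occurrences of v in enis) copies of sg to d[v].
theorem getD_inner_fold (d : PySem.Dict String (List String)) (sg : String) (enis : List String) (v : String) :
    (enis.foldl (fun d e => d.modify e [] (· ++ [sg])) d).getD v []
      = d.getD v [] ++ (enis.filter (fun e => e == v)).map (fun _ => sg) := by
  have h := PySem.Dict.getD_foldl_modify_append (l := enis.map (fun e => (e, sg))) (d := d) (c := v)
  simp only [List.foldl_map] at h
  rw [h]
  simp [List.filter_map, Function.comp_def]

-- The whole reverse-index build: d[v] accumulates exactly B's nested scan.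
theorem getD_build (sg_enis : List (String × List String)) (d : PySem.Dict String (List String)) (v : String) :
    (sg_enis.foldl (fun d p => p.2.foldl (fun d e => d.modify e [] (· ++ [p.1])) d) d).getD v []
      = d.getD v [] ++ sg_enis.flatMap (fun p => (p.2.filter (fun e => e == v)).map (fun _ => p.1)) := by
  induction sg_enis generalizing d with
  | nil => simp
  | cons p rest ih =>
      simp only [List.foldl_cons, List.flatMap_cons, ih, getD_inner_fold]
      simp [List.append_assoc]

-- ===== VERDICT (by name: the statement is the Claim_ definition above) =====
theorem mk_instance_sg_spec : Claim_equal_mk_instance_sg := by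
  intro sg_enis instance_enis _hDom hPre
  simp only [Spec_mk_instance_sg, mk_instance_sg, mk_instance_sg_alt]
  have hfresh : ∀ kv ∈ instance_enis, (PySem.Dict.empty : PySem.Dict String (List String)).contains kv.1 = false := by
    intro kv _; simp [PySem.Dict.contains_empty]
  have hitems := PySem.Dict.items_foldl_insert_fresh
    (l := instance_enis) (k := Prod.fst)
    (v := fun kv => (sg_enis.foldl (fun d p => p.2.foldl (fun d e => d.modify e [] (· ++ [p.1])) d) PySem.Dict.empty).getD kv.2 [])
    (d := PySem.Dict.empty) hfresh hPre.2
  simp only at hitems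
  rw [hitems]
  have hemp : (PySem.Dict.empty : PySem.Dict String (List String)).items = [] := rfl
  rw [hemp, List.nil_append]
  apply List.map_congr_left
  intro kv _
  simp [getD_build]
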